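-- pv_equiv track=rewrite | github.com/marianogarciamelo/COMP379MarchMadness | SVM.py | build_seedwise_bracket_order
-- ===== SOURCE A (Python) =====
-- def build_seedwise_bracket_order(n):
--     """
--     Build a simple seed-wise pairing:
--       indices [0..n-1] are assumed sorted best-to-worst.
--       First round: (0 vs n-1), (1 vs n-2), (2 vs n-3), ...
--     Returns:
--       list of indices in the order of their first-round appearance.
--     """
--     order = []
--     left = 0
--     right = n - 1
--     while left < right:
--         order.append(left)
--         order.append(right)
--         left += 1
--         right -= 1
--     if left == right:
--         order.append(left)
--     return order
-- ===== SOURCE B (Python) =====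
-- def build_seedwise_bracket_order(n):
--     return [i // 2 if i % 2 == 0 else n - 1 - i // 2 for i in range(n)]
-- ===== Notes on version B (the rewrite author's own statement) =====
-- stated objective: simpler
-- what changed: Replaces the two-pointer while-loop with a separate odd-n middle case by a single comprehension computing slot i directly via the closed form i//2 (even i) / n-1-i//2 (odd i).
import Mathlib
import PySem

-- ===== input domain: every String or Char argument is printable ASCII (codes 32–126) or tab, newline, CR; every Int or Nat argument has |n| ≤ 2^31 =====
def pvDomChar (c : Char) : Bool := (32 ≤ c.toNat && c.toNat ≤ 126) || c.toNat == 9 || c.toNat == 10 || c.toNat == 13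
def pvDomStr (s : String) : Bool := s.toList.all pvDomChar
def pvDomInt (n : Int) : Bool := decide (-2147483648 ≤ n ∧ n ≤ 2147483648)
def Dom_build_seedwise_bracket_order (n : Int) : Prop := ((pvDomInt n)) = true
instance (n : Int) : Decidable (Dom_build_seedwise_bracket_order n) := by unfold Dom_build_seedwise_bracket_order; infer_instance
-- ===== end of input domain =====

-- B replaces A's two-pointer while-loop (with its separate odd-n middle append) by one
-- comprehension computing each slot directly from its index (objective: simpler).

-- ===== PORT A =====
-- A's while-loop: two converging pointers, appending left then right each step,
-- and a final single append when the pointers meet.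
def pvLoopA (left right : Int) (order : List Int) : List Int :=
  if left < right then
    pvLoopA (left + 1) (right - 1) (order ++ [left, right])
  else if left = right then order ++ [left]
  else order
termination_by (right - left).toNat
decreasing_by omega

def build_seedwise_bracket_order (n : Int) : List Int :=
  pvLoopA 0 (n - 1) []

-- ===== PORT B =====
def build_seedwise_bracket_order_alt (n : Int) : List Int :=
  (PySem.List.pyRange 0 n 1).map (fun i =>
    if PySem.Int.mod i 2 = 0 then PySem.Int.floordiv i 2
    else n - 1 - PySem.Int.floordiv i 2)

-- ===== PRECONDITION & SPEC =====
def Spec_build_seedwise_bracket_order (n : Int) (out : List Int) : Prop := out = build_seedwise_bracket_order_alt n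
instance (n : Int) (out : List Int) : Decidable (Spec_build_seedwise_bracket_order n out) := by unfold Spec_build_seedwise_bracket_order; infer_instance

-- ===== CLAIM (what is proved, stated in full; the proofs are below) =====
def Claim_equal_build_seedwise_bracket_order : Prop := ∀ (n : Int), Dom_build_seedwise_bracket_order n → Spec_build_seedwise_bracket_order n (build_seedwise_bracket_order n)

-- ===== LEMMAS AND PROOFS =====

-- closed form of one output slot, parameterised by the left pointer l and span k (right = l + k)
def pvSlot (l : Int) (k : Nat) (j : Nat) : Int :=
  if j % 2 = 0 then l + ((j / 2 : Nat) : Int) else l + (k : Int) - ((j / 2 : Nat) : Int)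

lemma pvSlot_shift (l : Int) (k j : Nat) :
    pvSlot l (k + 2) (j + 2) = pvSlot (l + 1) k j := by
  unfold pvSlot
  have h2 : (j + 2) % 2 = j % 2 := by omega
  have h3 : (j + 2) / 2 = j / 2 + 1 := by omega
  rw [h2, h3]
  split_ifs with h
  · push_cast; ring
  · push_cast; ring

lemma pvLoopA_closed (k : Nat) (l : Int) (acc : List Int) :
    pvLoopA l (l + (k : Int)) acc = acc ++ (List.range (k + 1)).map (pvSlot l k) := by
  induction k using Nat.strong_induction_on generalizing l acc with
  | _ k ih =>
    match k with
    | 0 =>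
      rw [pvLoopA]
      simp [pvSlot]
    | 1 =>
      rw [pvLoopA, pvLoopA]
      norm_num
      simp [List.range_succ, pvSlot]
    | (k + 2) =>
      rw [pvLoopA]
      have hlt : l < l + ((k : Int) + 2) := by omega
      have harith : l + ((k + 2 : Nat) : Int) - 1 = (l + 1) + (k : Int) := by push_cast; ring
      simp only [if_pos (by push_cast; omega : l < l + ((k + 2 : Nat) : Int)), harith]
      rw [ih k (by omega) (l + 1)]
      have hr : List.range (k + 2 + 1) = 0 :: 1 :: (List.range (k + 1)).map (fun j => j + 2) := by
        rw [List.range_succ_eq_map, List.range_succ_eq_map]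
        simp only [List.map_cons, List.map_map]
        refine congrArg _ (congrArg _ ?_)
        exact List.map_congr_left (fun j _ => by simp [Function.comp])
      rw [hr]
      simp only [List.map_cons, List.map_map]
      have hfun : (pvSlot l (k + 2)) ∘ (fun j => j + 2) = pvSlot (l + 1) k := by
        funext j; exact pvSlot_shift l k j
      rw [hfun]
      have h0 : pvSlot l (k + 2) 0 = l := by simp [pvSlot]
      have h1 : pvSlot l (k + 2) 1 = l + ((k + 2 : Nat) : Int) := by
        unfold pvSlot
        norm_num
      rw [h0, h1]
      push_cast
      simp

-- ===== VERDICT (by name: the statement is the Claim_ definition above) =====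
theorem build_seedwise_bracket_order_spec : Claim_equal_build_seedwise_bracket_order := by
  intro n _
  unfold Spec_build_seedwise_bracket_order build_seedwise_bracket_order build_seedwise_bracket_order_alt
  rw [PySem.List.pyRange_one]
  by_cases hn : n ≤ 0
  · have h0 : (n - 0).toNat = 0 := by omega
    rw [h0]
    rw [pvLoopA]
    have : ¬ (0 : Int) < n - 1 := by omega
    rw [if_neg this, if_neg (by omega : ¬ (0 : Int) = n - 1)]
    simp
  · push Not at hn
    obtain ⟨k, hk⟩ : ∃ k : Nat, n - 1 = (k : Int) := ⟨(n - 1).toNat, by omega⟩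
    have hn0 : (n - 0).toNat = k + 1 := by omega
    rw [hn0]
    have : n - 1 = 0 + (k : Int) := by omega
    rw [this] at hk ⊢
    rw [pvLoopA_closed k 0 [], List.map_map]
    simp only [List.nil_append]
    apply List.map_congr_left
    intro j hj
    simp only [List.mem_range, Function.comp] at hj ⊢
    have hmod : PySem.Int.mod (0 + (j : Int)) 2 = ((j % 2 : Nat) : Int) := by
      rw [zero_add]; exact_mod_cast PySem.Int.mod_natCast j 2
    have hdiv : PySem.Int.floordiv (0 + (j : Int)) 2 = ((j / 2 : Nat) : Int) := by
      rw [zero_add]; exact_mod_cast PySem.Int.floordiv_natCast j 2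
    rw [hmod, hdiv]
    by_cases he : j % 2 = 0
    · simp [pvSlot, he]
    · have hne : ¬ ((j % 2 : Nat) : Int) = 0 := by omega
      rw [if_neg hne]
      unfold pvSlot
      rw [if_neg he]
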